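-- pv_equiv track=rewrite | github.com/btrobot/pi2-web | pipeline/speech_mt_preprocess.py | _bucket_text
-- ===== SOURCE A (Python) =====
-- _MAX_BUCKET_CHARS = 24
--
-- def _bucket_text(text: str) -> str:
--     dense_text = text.replace(" ", "")
--     if not dense_text:
--         return ""
--
--     buckets = [
--         dense_text[index:index + _MAX_BUCKET_CHARS]
--         for index in range(0, len(dense_text), _MAX_BUCKET_CHARS)
--     ]
--     return " ".join(buckets)
-- ===== SOURCE B (Python) =====
-- _MAX_BUCKET_CHARS = 24
--
-- def _bucket_text(text: str) -> str:
--     buckets = []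
--     cur = []
--     for ch in text:
--         if ch == " ":
--             continue
--         cur.append(ch)
--         if len(cur) == _MAX_BUCKET_CHARS:
--             buckets.append("".join(cur))
--             cur = []
--     if cur:
--         buckets.append("".join(cur))
--     return " ".join(buckets)
-- ===== Notes on version B (the rewrite author's own statement) =====
-- stated objective: alternative
-- what changed: Single char-by-char pass with a bucket accumulator that flushes every 24 kept characters, instead of building the dense string with replace and slicing it by ranges.
import Mathlib
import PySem

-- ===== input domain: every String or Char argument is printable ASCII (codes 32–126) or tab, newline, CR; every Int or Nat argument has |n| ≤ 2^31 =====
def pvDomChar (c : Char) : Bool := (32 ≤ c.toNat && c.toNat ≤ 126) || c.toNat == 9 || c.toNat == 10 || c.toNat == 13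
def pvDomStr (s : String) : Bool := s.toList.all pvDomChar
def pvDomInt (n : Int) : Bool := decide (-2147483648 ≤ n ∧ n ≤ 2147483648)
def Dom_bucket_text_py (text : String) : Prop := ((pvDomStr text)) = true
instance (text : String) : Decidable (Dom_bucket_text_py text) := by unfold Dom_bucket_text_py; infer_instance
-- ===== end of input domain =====

-- B replaces A's replace-then-slice-by-range scheme with a single char-by-char pass that
-- accumulates kept characters and flushes a bucket every 24 of them (alternative decomposition).


-- ===== PORT A =====
def bucket_text_py (text : String) : String :=
  let dense := PySem.Str.replace text " " ""
  if dense = "" then ""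
  else
    let buckets :=
      (PySem.List.pyRange 0 (PySem.Str.len dense) 24).map
        (fun index => PySem.Str.slice dense (some index) (some (index + 24)))
    PySem.Str.join " " buckets

-- ===== PORT B =====
def bucketStep (st : List String × List Char) (ch : Char) : List String × List Char :=
  if ch = ' ' then st
  else
    let cur := st.2 ++ [ch]
    if cur.length = 24 then (st.1 ++ [String.ofList cur], []) else (st.1, cur)

def bucket_text_py_alt (text : String) : String :=
  let st := text.toList.foldl bucketStep ([], [])
  let buckets := if st.2 = [] then st.1 else st.1 ++ [String.ofList st.2]
  PySem.Str.join " " buckets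

-- ===== PRECONDITION & SPEC =====
def Spec_bucket_text_py (text : String) (out : String) : Prop := out = bucket_text_py_alt text
instance (text : String) (out : String) : Decidable (Spec_bucket_text_py text out) := by unfold Spec_bucket_text_py; infer_instance

-- ===== CLAIM (what is proved, stated in full; the proofs are below) =====
def Claim_equal_bucket_text_py : Prop := ∀ (text : String), Dom_bucket_text_py text → Spec_bucket_text_py text (bucket_text_py text)

-- ===== LEMMAS AND PROOFS =====

-- A's result described as chunks of the dense character list
def chunks (l : List Char) : List (List Char) :=
  if _h : l = [] then [] else l.take 24 :: chunks (l.drop 24)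
termination_by l.length
decreasing_by
  have : l.length ≠ 0 := by simpa using _h
  simp [List.length_drop]; omega

lemma chunks_eq_range_aux : ∀ (n : Nat) (l : List Char), l.length ≤ n →
    chunks l = (List.range ((l.length + 23) / 24)).map (fun k => (l.drop (24 * k)).take 24) := by
  intro n
  induction n with
  | zero =>
    intro l h
    have : l = [] := List.length_eq_zero_iff.mp (Nat.le_zero.mp h)
    subst this
    simp [chunks]
  | succ n ih =>
    intro l h
    by_cases hnil : l = []
    · subst hnil; simp [chunks]
    · have hl : l.length ≠ 0 := by simpa using hnil
      have hm : (l.length + 23) / 24 = ((l.drop 24).length + 23) / 24 + 1 := by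
        simp [List.length_drop]; omega
      have hd : (l.drop 24).length ≤ n := by simp [List.length_drop]; omega
      rw [chunks, dif_neg hnil, ih (l.drop 24) hd, hm, List.range_succ_eq_map]
      simp only [List.map_cons, List.map_map, Function.comp_def, List.drop_drop, List.drop_zero,
        Nat.mul_zero]
      congr 1
      apply List.map_congr_left
      intro k _
      congr 2
      omega

lemma chunks_eq_range (l : List Char) :
    chunks l = (List.range ((l.length + 23) / 24)).map (fun k => (l.drop (24 * k)).take 24) :=
  chunks_eq_range_aux l.length l le_rfl

lemma replace_go_filter : ∀ (fuel : Nat) (l acc : List Char), l.length ≤ fuel →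
    PySem.Chars.replace.go [' '] [] fuel l acc = acc.reverse ++ l.filter (fun c => !decide (c = ' ')) := by
  intro fuel
  induction fuel with
  | zero =>
    intro l acc h
    have : l = [] := List.length_eq_zero_iff.mp (Nat.le_zero.mp h)
    subst this
    simp [PySem.Chars.replace.go]
  | succ n ih =>
    intro l acc h
    cases l with
    | nil => simp [PySem.Chars.replace.go]
    | cons c t =>
      have ht : t.length ≤ n := by simpa using h
      by_cases hc : c = ' '
      · subst hc
        rw [PySem.Chars.replace.go]
        simp only [List.isPrefixOf, BEq.rfl, Bool.true_and, if_true,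
          List.length_cons, List.length_nil, List.drop_succ_cons, List.drop_zero,
          List.reverse_nil, List.nil_append]
        rw [ih t acc ht]
        simp
      · rw [PySem.Chars.replace.go]
        have : ([' '].isPrefixOf (c :: t)) = false := by
          simp [List.isPrefixOf]
          exact fun h' => absurd h'.symm hc
        rw [this]
        simp only [Bool.false_eq_true, if_false]
        rw [ih t (c :: acc) ht]
        simp [hc]

lemma dense_toList (text : String) :
    (PySem.Str.replace text " " "").toList = text.toList.filter (fun c => !decide (c = ' ')) := by
  rw [PySem.Str.toList_replace]
  show PySem.Chars.replace text.toList [' '] [] = _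
  rw [PySem.Chars.replace]
  simp only [List.isEmpty_cons, Bool.false_eq_true, if_false]
  exact (replace_go_filter text.toList.length text.toList [] le_rfl).trans (by simp)

-- A side: the range-of-slices comprehension is exactly `chunks`
lemma A_buckets (l : List Char) :
    (PySem.List.pyRange 0 (l.length : Int) 24).map
        (fun i => PySem.List.slice l (some i) (some (i + 24))) = chunks l := by
  rw [PySem.List.pyRange_of_pos 0 (l.length : Int) (by norm_num), chunks_eq_range]
  have hcnt : (if (0 : Int) < (l.length : Int) then (((l.length : Int) - 0 + 24 - 1) / 24).toNat else 0)
      = (l.length + 23) / 24 := by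
    split_ifs with h
    · omega
    · omega
  rw [hcnt, List.map_map]
  apply List.map_congr_left
  intro k _
  show PySem.List.slice l (some (0 + 24 * (k : Int))) (some (0 + 24 * (k : Int) + 24)) = _
  have h1 : (0 + 24 * (k : Int)) = ((24 * k : Nat) : Int) := by push_cast; ring
  rw [h1]
  have h2 : ((24 * k : Nat) : Int) + 24 = ((24 * k : Nat) : Int) + ((24 : Nat) : Int) := by norm_num
  rw [h2, PySem.List.slice_natCast_add]

-- B side: value of the accumulator loop, described structurally
def gchunks : List Char → List Char → List (List Char)
  | cur, [] => if cur = [] then [] else [cur]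
  | cur, c :: l =>
    if (cur ++ [c]).length = 24 then (cur ++ [c]) :: gchunks [] l else gchunks (cur ++ [c]) l

def finalize (st : List String × List Char) : List String :=
  if st.2 = [] then st.1 else st.1 ++ [String.ofList st.2]

lemma foldl_step_filter : ∀ (l : List Char) (st : List String × List Char),
    l.foldl bucketStep st = (l.filter (fun c => !decide (c = ' '))).foldl bucketStep st := by
  intro l
  induction l with
  | nil => intro st; rfl
  | cons c t ih =>
    intro st
    by_cases hc : c = ' '
    · subst hc
      simp [bucketStep, ih]
    · simp [hc, List.foldl_cons, ih]

lemma B1 : ∀ (l : List Char) (bs : List String) (cur : List Char), (∀ c ∈ l, c ≠ ' ') →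
    finalize (l.foldl bucketStep (bs, cur)) = bs ++ (gchunks cur l).map String.ofList := by
  intro l
  induction l with
  | nil =>
    intro bs cur _
    simp only [List.foldl_nil, finalize, gchunks]
    split_ifs <;> simp
  | cons c t ih =>
    intro bs cur hsp
    have hc : c ≠ ' ' := hsp c (by simp)
    have hstep : bucketStep (bs, cur) c =
        if (cur ++ [c]).length = 24 then (bs ++ [String.ofList (cur ++ [c])], []) else (bs, cur ++ [c]) := by
      simp [bucketStep, hc]
    rw [List.foldl_cons, hstep]
    by_cases h24 : (cur ++ [c]).length = 24
    · rw [if_pos h24, ih _ _ (fun x hx => hsp x (by simp [hx]))]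
      simp [gchunks, h24]
    · rw [if_neg h24, ih _ _ (fun x hx => hsp x (by simp [hx]))]
      have h23 : cur.length ≠ 23 := by
        have : (cur ++ [c]).length = cur.length + 1 := by simp
        omega
      simp [gchunks, h23]

lemma B2 : ∀ (l cur : List Char), cur.length < 24 → gchunks cur l = chunks (cur ++ l) := by
  intro l
  induction l with
  | nil =>
    intro cur hcur
    rw [gchunks, chunks]
    by_cases h : cur = []
    · simp [h]
    · rw [dif_neg (by simpa using h), if_neg h]
      have ht : cur.take 24 = cur := List.take_of_length_le (by omega)
      have hd : cur.drop 24 = [] := List.drop_eq_nil_of_le (by omega)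
      simp [ht, hd, chunks]
  | cons c t ih =>
    intro cur hcur
    rw [gchunks]
    by_cases h24 : (cur ++ [c]).length = 24
    · rw [if_pos h24, ih [] (by norm_num), List.nil_append]
      have hlen : (cur ++ [c]).length = cur.length + 1 := by simp
      have hassoc : cur ++ c :: t = (cur ++ [c]) ++ t := by simp
      have htake : ((cur ++ [c]) ++ t).take 24 = cur ++ [c] := by
        rw [List.take_append_of_le_length (by omega)]
        exact List.take_of_length_le (by omega)
      have hdrop : ((cur ++ [c]) ++ t).drop 24 = t := by
        rw [List.drop_append_of_le_length (by omega)]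
        rw [List.drop_eq_nil_of_le (by omega), List.nil_append]
      rw [hassoc]
      conv_rhs => rw [chunks]
      rw [dif_neg (by simp), htake, hdrop]
    · have hlt : (cur ++ [c]).length < 24 := by
        have : (cur ++ [c]).length = cur.length + 1 := by simp
        omega
      rw [if_neg h24, ih (cur ++ [c]) hlt]
      simp

-- ===== VERDICT (by name: the statement is the Claim_ definition above) =====
theorem bucket_text_py_spec : Claim_equal_bucket_text_py := by
  intro text _
  show bucket_text_py text = bucket_text_py_alt text
  have hd := dense_toList text
  have hB : bucket_text_py_alt text =
      PySem.Str.join " " ((chunks (text.toList.filter (fun c => !decide (c = ' ')))).map String.ofList) := by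
    show PySem.Str.join " " (finalize (text.toList.foldl bucketStep ([], []))) = _
    rw [foldl_step_filter, B1 _ _ _ (by intro c hc; simpa using (List.of_mem_filter hc))]
    rw [B2 _ _ (by norm_num)]
    simp only [List.nil_append]
  rw [hB]
  by_cases hempty : PySem.Str.replace text " " "" = ""
  · have hdnil : text.toList.filter (fun c => !decide (c = ' ')) = [] := by rw [← hd, hempty]; rfl
    have hch : chunks ([] : List Char) = [] := by rw [chunks]; simp
    simp only [bucket_text_py, hempty, if_true]
    rw [hdnil, hch, List.map_nil]
    rfl
  · simp only [bucket_text_py, if_neg hempty]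
    apply String.toList_inj.mp
    rw [PySem.Str.toList_join, PySem.Str.toList_join]
    refine congrArg (PySem.Chars.join " ".toList) ?_
    rw [List.map_map, List.map_map]
    have hlen : PySem.Str.len (PySem.Str.replace text " " "") =
        ((text.toList.filter (fun c => !decide (c = ' '))).length : Int) := by
      rw [PySem.Str.len, hd]
    rw [hlen]
    have hmapA : ((PySem.List.pyRange 0 (((text.toList.filter (fun c => !decide (c = ' '))).length : Int)) 24).map
        (String.toList ∘ fun index => PySem.Str.slice (PySem.Str.replace text " " "") (some index) (some (index + 24))))
        = (PySem.List.pyRange 0 (((text.toList.filter (fun c => !decide (c = ' '))).length : Int)) 24).map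
            (fun i => PySem.List.slice (text.toList.filter (fun c => !decide (c = ' '))) (some i) (some (i + 24))) := by
      apply List.map_congr_left
      intro i _
      show (PySem.Str.slice (PySem.Str.replace text " " "") (some i) (some (i + 24))).toList = _
      rw [PySem.Str.toList_slice, PySem.Chars.slice_eq_listSlice, hd]
    rw [hmapA, A_buckets]
    simp [Function.comp_def]
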